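-- pv_equiv track=rewrite | github.com/josalvatorre/practice-questions | maximum_sum_submatrix.py | delta_windows
-- ===== SOURCE A (Python) =====
-- from typing import Generator, List, Tuple
--
-- _2DList = List[List[int]]
--
-- def delta_windows(
--     matrix: _2DList,
--     row: int,
--     size: int,
--     col_count: int,
-- ) -> Generator[Tuple[int, int], None, None]:
--
--     receding_window_row = row - 1
--     receding_window = sum(matrix[receding_window_row][c] for c in range(size))
--     new_window_row = row + size - 1
--     new_window = sum(matrix[new_window_row][c] for c in range(size))
--
--     yield (receding_window, new_window)
--
--     for col in range(1, col_count - size + 1):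
--
--         receding_col = col - 1
--         new_col = col + size - 1
--
--         receding_window += (
--             matrix[receding_window_row][new_col]
--             - matrix[receding_window_row][receding_col]
--         )
--         new_window += (
--             matrix[new_window_row][new_col]
--             - matrix[new_window_row][receding_col]
--         )
--         yield (receding_window, new_window)
--     pass
-- ===== SOURCE B (Python) =====
-- from typing import Generator, List, Tuple
--
-- _2DList = List[List[int]]
--
-- def delta_windows(
--     matrix: _2DList,
--     row: int,
--     size: int,
--     col_count: int,
-- ) -> Generator[Tuple[int, int], None, None]:
--     top = row - 1
--     bottom = row + size - 1
--     yield (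
--         sum(matrix[top][c] for c in range(size)),
--         sum(matrix[bottom][c] for c in range(size)),
--     )
--     for col in range(1, col_count - size + 1):
--         yield (
--             sum(matrix[top][c] for c in range(col, col + size)),
--             sum(matrix[bottom][c] for c in range(col, col + size)),
--         )
-- ===== Notes on version B (the rewrite author's own statement) =====
-- stated objective: simpler
-- what changed: Replaces the incremental O(1) sliding update of the two running window sums with a direct recomputation of each window sum by scanning its size columns, eliminating the mutable accumulators.
-- outside the precondition, e.g. on delta_windows([[1, 2]], 1, -1, 0): A returns [(0, 0), (1, 1)], B returns [(0, 0), (0, 0)]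
import Mathlib
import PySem

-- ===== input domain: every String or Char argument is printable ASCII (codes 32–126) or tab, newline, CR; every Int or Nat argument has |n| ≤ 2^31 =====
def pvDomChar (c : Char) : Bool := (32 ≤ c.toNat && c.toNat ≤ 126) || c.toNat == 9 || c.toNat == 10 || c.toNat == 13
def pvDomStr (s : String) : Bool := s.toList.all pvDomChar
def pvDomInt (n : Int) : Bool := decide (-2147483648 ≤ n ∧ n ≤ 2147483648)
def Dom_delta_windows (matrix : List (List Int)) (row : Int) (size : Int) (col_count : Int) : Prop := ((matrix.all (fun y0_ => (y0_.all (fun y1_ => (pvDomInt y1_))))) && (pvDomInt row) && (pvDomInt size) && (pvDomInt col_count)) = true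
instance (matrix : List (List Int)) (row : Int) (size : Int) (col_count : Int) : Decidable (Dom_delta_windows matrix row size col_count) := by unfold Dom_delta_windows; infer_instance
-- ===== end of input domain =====

-- B recomputes each window sum by scanning its columns instead of A's incremental
-- sliding update; equivalence is about the list of yielded pairs.

-- ===== PORT A =====
def delta_windows (matrix : List (List Int)) (row : Int) (size : Int) (col_count : Int) : List (Int × Int) :=
  let receding_window_row := row - 1
  let receding_window := (PySem.List.pyRange 0 size 1).foldl
      (fun acc c => acc + PySem.List.pyGetD (PySem.List.pyGetD matrix receding_window_row []) c 0) 0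
  let new_window_row := row + size - 1
  let new_window := (PySem.List.pyRange 0 size 1).foldl
      (fun acc c => acc + PySem.List.pyGetD (PySem.List.pyGetD matrix new_window_row []) c 0) 0
  let st := (PySem.List.pyRange 1 (col_count - size + 1) 1).foldl
      (fun (st : Int × Int × List (Int × Int)) col =>
        let receding_col := col - 1
        let new_col := col + size - 1
        let r := st.1 + (PySem.List.pyGetD (PySem.List.pyGetD matrix receding_window_row []) new_col 0
                          - PySem.List.pyGetD (PySem.List.pyGetD matrix receding_window_row []) receding_col 0)
        let n := st.2.1 + (PySem.List.pyGetD (PySem.List.pyGetD matrix new_window_row []) new_col 0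
                          - PySem.List.pyGetD (PySem.List.pyGetD matrix new_window_row []) receding_col 0)
        (r, n, st.2.2 ++ [(r, n)]))
      (receding_window, new_window, [(receding_window, new_window)])
  st.2.2

-- ===== PORT B =====
-- sum(matrix[r][c] for c in range(lo, hi))
def pvWinSum (r : List Int) (lo hi : Int) : Int :=
  (PySem.List.pyRange lo hi 1).foldl (fun acc c => acc + PySem.List.pyGetD r c 0) 0

def delta_windows_alt (matrix : List (List Int)) (row : Int) (size : Int) (col_count : Int) : List (Int × Int) :=
  let top := PySem.List.pyGetD matrix (row - 1) []
  let bottom := PySem.List.pyGetD matrix (row + size - 1) []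
  (pvWinSum top 0 size, pvWinSum bottom 0 size) ::
    (PySem.List.pyRange 1 (col_count - size + 1) 1).map
      (fun col => (pvWinSum top col (col + size), pvWinSum bottom col (col + size)))

-- ===== PRECONDITION & SPEC =====
-- Pre_ is exactly the set of inputs on which the Python A returns without raising,
-- except that for size < 0 with a nonempty column loop (size < col_count) A's sliding
-- updates read columns by Python negative-index wraparound, an accident of the
-- degenerate window that B's fresh empty-window sums do not reproduce; those inputs
-- are excluded.
def Pre_delta_windows (matrix : List (List Int)) (row : Int) (size : Int) (col_count : Int) : Prop :=
  (1 ≤ size ∧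
    PySem.Raise.InRange matrix.length (row - 1) ∧
    PySem.Raise.InRange matrix.length (row + size - 1) ∧
    size ≤ ((PySem.List.pyGetD matrix (row - 1) []).length : Int) ∧
    size ≤ ((PySem.List.pyGetD matrix (row + size - 1) []).length : Int) ∧
    (size < col_count →
      col_count ≤ ((PySem.List.pyGetD matrix (row - 1) []).length : Int) ∧
      col_count ≤ ((PySem.List.pyGetD matrix (row + size - 1) []).length : Int))) ∨
  (size = 0 ∧
    (1 ≤ col_count →
      PySem.Raise.InRange matrix.length (row - 1) ∧
      col_count ≤ ((PySem.List.pyGetD matrix (row - 1) []).length : Int))) ∨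
  (size < 0 ∧ col_count ≤ size)

instance (matrix : List (List Int)) (row : Int) (size : Int) (col_count : Int) : Decidable (Pre_delta_windows matrix row size col_count) := by unfold Pre_delta_windows; infer_instance

def pvWitness_delta_windows : List (List Int) × Int × Int × Int := ([[1, 2, 3], [4, 5, 6]], 1, 1, 3)

def Spec_delta_windows (matrix : List (List Int)) (row : Int) (size : Int) (col_count : Int) (out : List (Int × Int)) : Prop := out = delta_windows_alt matrix row size col_count
instance (matrix : List (List Int)) (row : Int) (size : Int) (col_count : Int) (out : List (Int × Int)) : Decidable (Spec_delta_windows matrix row size col_count out) := by unfold Spec_delta_windows; infer_instance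

-- ===== CLAIM (what is proved, stated in full; the proofs are below) =====
def Claim_equal_delta_windows : Prop := ∀ (matrix : List (List Int)) (row : Int) (size : Int) (col_count : Int), Dom_delta_windows matrix row size col_count → Pre_delta_windows matrix row size col_count → Spec_delta_windows matrix row size col_count (delta_windows matrix row size col_count)

-- ===== LEMMAS AND PROOFS =====

-- abstract window sum over f on [lo, hi)
def pvS (f : Int → Int) (lo hi : Int) : Int :=
  (PySem.List.pyRange lo hi 1).foldl (fun a c => a + f c) 0

lemma pvS_eq_sum (f : Int → Int) (lo hi : Int) :
    pvS f lo hi = ((PySem.List.pyRange lo hi 1).map f).sum := by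
  simp [pvS, PySem.List.foldl_add]

lemma pvS_succ_left (f : Int → Int) (c hi : Int) (h : c < hi) :
    pvS f c hi = f c + pvS f (c + 1) hi := by
  rw [pvS_eq_sum, pvS_eq_sum, PySem.List.pyRange_one_cons h]
  simp

lemma pvS_succ_right (f : Int → Int) (lo hi : Int) (h : lo ≤ hi) :
    pvS f lo (hi + 1) = pvS f lo hi + f hi := by
  rw [pvS_eq_sum, pvS_eq_sum, PySem.List.pyRange_one_succ_right h]
  simp

lemma pvS_telescope (f : Int → Int) (size : Int) (hs : 0 ≤ size) (c : Int) :
    pvS f c (c + size) + (f (c + size) - f c) = pvS f (c + 1) (c + 1 + size) := by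
  by_cases h0 : size = 0
  · subst h0
    rw [show c + (0:Int) = c from by ring, show c + 1 + (0:Int) = c + 1 from by ring]
    rw [pvS, PySem.List.pyRange_one_eq_nil (le_refl c), pvS,
      PySem.List.pyRange_one_eq_nil (le_refl (c + 1))]
    simp
  rw [pvS_succ_left f c (c + size) (by omega)]
  have h : c + 1 + size = c + size + 1 := by ring
  rw [h, pvS_succ_right f (c + 1) (c + size) (by omega)]
  ring

lemma pvWinSum_of_le (r : List Int) (lo hi : Int) (h : hi ≤ lo) : pvWinSum r lo hi = 0 := by
  rw [pvWinSum, PySem.List.pyRange_one_eq_nil h]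
  rfl

lemma pv_loop_eq (f g : Int → Int) (size : Int) (hs : 0 ≤ size) :
    ∀ (n : Nat) (lo : Int) (acc : List (Int × Int)),
      ((PySem.List.pyRange lo (lo + n) 1).foldl
        (fun (st : Int × Int × List (Int × Int)) col =>
          let r := st.1 + (f (col + size - 1) - f (col - 1))
          let m := st.2.1 + (g (col + size - 1) - g (col - 1))
          (r, m, st.2.2 ++ [(r, m)]))
        (pvS f (lo - 1) (lo - 1 + size), pvS g (lo - 1) (lo - 1 + size), acc)).2.2
      = acc ++ (PySem.List.pyRange lo (lo + n) 1).map
          (fun col => (pvS f col (col + size), pvS g col (col + size))) := by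
  intro n
  induction n with
  | zero =>
    intro lo acc
    rw [PySem.List.pyRange_one_eq_nil (show lo + ((0:Nat):Int) ≤ lo by omega)]
    simp
  | succ k ih =>
    intro lo acc
    have hlt : lo < lo + ((k + 1 : Nat) : Int) := by push_cast; omega
    rw [PySem.List.pyRange_one_cons hlt]
    simp only [List.foldl_cons, List.map_cons]
    have hr : pvS f (lo - 1) (lo - 1 + size) + (f (lo + size - 1) - f (lo - 1))
        = pvS f lo (lo + size) := by
      have := pvS_telescope f size hs (lo - 1)
      rw [show lo - 1 + 1 = lo from by ring] at this
      rw [show lo + size - 1 = lo - 1 + size from by ring]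
      exact this
    have hm : pvS g (lo - 1) (lo - 1 + size) + (g (lo + size - 1) - g (lo - 1))
        = pvS g lo (lo + size) := by
      have := pvS_telescope g size hs (lo - 1)
      rw [show lo - 1 + 1 = lo from by ring] at this
      rw [show lo + size - 1 = lo - 1 + size from by ring]
      exact this
    have hrange : lo + ((k + 1 : Nat) : Int) = (lo + 1) + (k : Int) := by push_cast; ring
    have hinit : (pvS f lo (lo + size), pvS g lo (lo + size))
        = (pvS f ((lo + 1) - 1) ((lo + 1) - 1 + size), pvS g ((lo + 1) - 1) ((lo + 1) - 1 + size)) := by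
      norm_num
    simp only [hr, hm, hrange]
    have := ih (lo + 1) (acc ++ [(pvS f lo (lo + size), pvS g lo (lo + size))])
    rw [show ((lo + 1) - 1) = lo from by ring] at this
    rw [this]
    simp

-- ===== VERDICT (by name: the statement is the Claim_ definition above) =====
theorem delta_windows_spec : Claim_equal_delta_windows := by
  intro matrix row size col_count _ hpre
  unfold Spec_delta_windows
  by_cases hs : 0 ≤ size
  case neg =>
    have hneg : size < 0 := by omega
    have hcc : col_count ≤ size := by
      rcases hpre with ⟨h1, -⟩ | ⟨h0, -⟩ | ⟨-, hcc⟩ <;> omega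
    simp only [delta_windows, delta_windows_alt]
    rw [PySem.List.pyRange_one_eq_nil (show size ≤ (0:Int) by omega),
      PySem.List.pyRange_one_eq_nil (show col_count - size + 1 ≤ (1:Int) by omega)]
    rw [pvWinSum_of_le _ _ _ (show size ≤ (0:Int) by omega),
      pvWinSum_of_le _ _ _ (show size ≤ (0:Int) by omega)]
    simp
  clear hpre
  have hK : PySem.List.pyRange 1 (col_count - size + 1) 1
      = PySem.List.pyRange 1 (1 + ((col_count - size + 1 - 1).toNat : Int)) 1 := by
    by_cases h : 1 ≤ col_count - size + 1
    · congr 1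
      omega
    · rw [PySem.List.pyRange_one_eq_nil (by omega), PySem.List.pyRange_one_eq_nil (by omega)]
  simp only [delta_windows, delta_windows_alt]
  rw [hK]
  have L := pv_loop_eq
    (fun c => PySem.List.pyGetD (PySem.List.pyGetD matrix (row - 1) []) c 0)
    (fun c => PySem.List.pyGetD (PySem.List.pyGetD matrix (row + size - 1) []) c 0)
    size hs (col_count - size + 1 - 1).toNat 1
    [(pvS (fun c => PySem.List.pyGetD (PySem.List.pyGetD matrix (row - 1) []) c 0) 0 size,
      pvS (fun c => PySem.List.pyGetD (PySem.List.pyGetD matrix (row + size - 1) []) c 0) 0 size)]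
  rw [show (1:Int) - 1 = 0 from rfl, show (0:Int) + size = size from by ring] at L
  simp only [pvS, pvWinSum, List.singleton_append] at L ⊢
  exact L
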